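-- pv_equiv track=rewrite | github.com/Shinipsae/CosPro | Test/test01.py | solution8
-- ===== SOURCE A (Python) =====
-- def solution8(sentence):
--     filtered = []
--     for s in sentence:
--         if s != ' ' and s != '.':
--             filtered.append(s)
--     before = ''.join(filtered) # ''.join(string) 내장함수 중요
--     # ''안에 들어간 문자를 기준으로 합쳐서 string으로 반환
--     # list to string
--     filtered.reverse() # string.reverse() 역정렬하는 내장함수
--     after = ''.join(filtered)
--     return before == after
-- ===== SOURCE B (Python) =====
-- def solution8(sentence):
--     filtered = [s for s in sentence if s != ' ' and s != '.']
--     text = ''.join(filtered)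
--     pos = 0
--     for s in reversed(filtered):
--         if not text.startswith(s, pos):
--             return False
--         pos += len(s)
--     return True
-- ===== Notes on version B (the rewrite author's own statement) =====
-- stated objective: alternative
-- what changed: B joins the filtered pieces only once and checks the reversed sequence of pieces against that single string chunk-by-chunk with a moving offset, short-circuiting on the first mismatch, instead of materialising a second reversed-and-joined string and comparing the two in full.
import Mathlib
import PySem

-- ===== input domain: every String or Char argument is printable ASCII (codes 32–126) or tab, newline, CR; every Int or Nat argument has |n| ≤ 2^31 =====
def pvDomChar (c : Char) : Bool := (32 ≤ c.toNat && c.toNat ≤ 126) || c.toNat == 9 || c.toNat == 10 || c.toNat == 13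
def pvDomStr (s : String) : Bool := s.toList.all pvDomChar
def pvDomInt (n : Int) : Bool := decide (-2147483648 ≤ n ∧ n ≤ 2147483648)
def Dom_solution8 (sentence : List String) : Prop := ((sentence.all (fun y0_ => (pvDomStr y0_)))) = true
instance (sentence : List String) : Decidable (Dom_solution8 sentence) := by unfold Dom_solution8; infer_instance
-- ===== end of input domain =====

-- B joins the filtered pieces only once and checks the reversed pieces against that string
-- chunk-by-chunk with a moving offset (short-circuiting), instead of building a second
-- reversed-and-joined string and comparing the two in full. Objective: alternative.

-- ===== PORT A =====
-- for s in sentence: if s != ' ' and s != '.': filtered.append(s)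
def solution8Filtered (sentence : List String) : List String :=
  sentence.foldl (fun acc s => if !(s == " ") && !(s == ".") then acc ++ [s] else acc) []

def solution8 (sentence : List String) : Bool :=
  let filtered := solution8Filtered sentence
  let before := PySem.Chars.join [] (filtered.map String.toList)   -- ''.join(filtered)
  let filtered2 := filtered.reverse                                -- filtered.reverse()
  let after := PySem.Chars.join [] (filtered2.map String.toList)   -- ''.join(filtered)
  before == after

-- ===== PORT B =====
-- the for-loop over reversed(filtered); text.startswith(s, pos) = startswith of text[pos:]
def solution8AltLoop (text : List Char) (pos : Nat) (rest : List String) : Bool :=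
  match rest with
  | [] => true
  | s :: rest' =>
      if PySem.Chars.startswith (text.drop pos) s.toList then
        solution8AltLoop text (pos + s.toList.length) rest'
      else
        false

def solution8_alt (sentence : List String) : Bool :=
  let filtered := sentence.filter (fun s => !(s == " ") && !(s == "."))
  let text := PySem.Chars.join [] (filtered.map String.toList)     -- ''.join(filtered)
  solution8AltLoop text 0 filtered.reverse

-- ===== PRECONDITION & SPEC =====
def Spec_solution8 (sentence : List String) (out : Bool) : Prop := out = solution8_alt sentence
instance (sentence : List String) (out : Bool) : Decidable (Spec_solution8 sentence out) := by unfold Spec_solution8; infer_instance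

-- ===== CLAIM (what is proved, stated in full; the proofs are below) =====
def Claim_equal_solution8 : Prop := ∀ (sentence : List String), Dom_solution8 sentence → Spec_solution8 sentence (solution8 sentence)

-- ===== LEMMAS AND PROOFS =====

-- A's append-loop builds exactly List.filter
theorem solution8Filtered_eq (sentence : List String) :
    solution8Filtered sentence = sentence.filter (fun s => !(s == " ") && !(s == ".")) := by
  have h : ∀ (l acc : List String),
      l.foldl (fun acc s => if !(s == " ") && !(s == ".") then acc ++ [s] else acc) acc
        = acc ++ l.filter (fun s => !(s == " ") && !(s == ".")) := by
    intro l
    induction l with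
    | nil => intro acc; simp
    | cons x xs ih =>
        intro acc
        rw [List.foldl_cons]
        by_cases hx : (!(x == " ") && !(x == ".")) = true
        · rw [if_pos hx, ih]
          simp only [List.filter_cons, hx, if_true, List.append_assoc, List.singleton_append]
        · rw [if_neg hx, ih]
          have hx' : (!(x == " ") && !(x == ".")) = false := by simpa using hx
          simp [hx']
  have h0 := h sentence []
  rw [List.nil_append] at h0
  exact h0

-- join with empty separator is flatten
theorem join_nil_eq_flatten (ps : List (List Char)) :
    PySem.Chars.join [] ps = ps.flatten := by
  induction ps with
  | nil => rw [PySem.Chars.join_nil, List.flatten_nil]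
  | cons p ps ih =>
      cases ps with
      | nil => rw [PySem.Chars.join_singleton]; simp
      | cons q qs =>
          rw [PySem.Chars.join_cons_cons, ih, List.flatten_cons]
          simp

-- prefix through an appended block
theorem append_prefix_iff (a b l : List Char) :
    a ++ b <+: l ↔ a <+: l ∧ b <+: l.drop a.length := by
  constructor
  · intro h
    obtain ⟨t, ht⟩ := h
    constructor
    · exact (List.prefix_append a b).trans ⟨t, ht⟩
    · have : l.drop a.length = b ++ t := by
        rw [← ht, List.append_assoc, List.drop_left]
      exact this ▸ List.prefix_append b t
  · rintro ⟨ha, ⟨t, ht⟩⟩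
    refine ⟨t, ?_⟩
    have hta : a = l.take a.length := List.prefix_iff_eq_take.mp ha
    calc a ++ b ++ t = a ++ (b ++ t) := by rw [List.append_assoc]
      _ = l.take a.length ++ l.drop a.length := by rw [← hta, ht]
      _ = l := List.take_append_drop _ _

-- B's loop succeeds iff the concatenation of the remaining pieces is a prefix of text[pos:]
theorem solution8AltLoop_iff (rest : List String) :
    ∀ (text : List Char) (pos : Nat),
      solution8AltLoop text pos rest = true ↔
        (rest.map String.toList).flatten <+: text.drop pos := by
  induction rest with
  | nil => intro text pos; unfold solution8AltLoop; simp
  | cons s rest' ih =>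
      intro text pos
      simp only [solution8AltLoop, List.map_cons, List.flatten_cons]
      by_cases hs : PySem.Chars.startswith (text.drop pos) s.toList = true
      · rw [if_pos hs, ih, append_prefix_iff, List.drop_drop]
        exact ⟨fun h => ⟨(PySem.Chars.startswith_iff _ _).mp hs, h⟩, fun h => h.2⟩
      · rw [if_neg hs]
        simp only [Bool.false_eq_true, false_iff]
        intro h
        exact hs ((PySem.Chars.startswith_iff _ _).mpr
          ((List.prefix_append s.toList _).trans h))

-- ===== VERDICT (by name: the statement is the Claim_ definition above) =====
theorem solution8_spec : Claim_equal_solution8 := by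
  intro sentence _
  unfold Spec_solution8 solution8 solution8_alt
  rw [solution8Filtered_eq]
  simp only [join_nil_eq_flatten, List.map_reverse]
  set f := sentence.filter (fun s => !(s == " ") && !(s == ".")) with hf
  set cs := f.map String.toList with hcs
  have hloop : solution8AltLoop cs.flatten 0 f.reverse = true ↔
      cs.reverse.flatten <+: cs.flatten := by
    rw [solution8AltLoop_iff]
    simp [hcs, List.map_reverse]
  have hlen : cs.reverse.flatten.length = cs.flatten.length := by
    simp [List.length_flatten, List.map_reverse, List.sum_reverse]
  by_cases h : cs.flatten = cs.reverse.flatten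
  · rw [hloop.mpr (by rw [← h])]
    simp [h]
  · have hfalse : solution8AltLoop cs.flatten 0 f.reverse = false := by
      rw [Bool.eq_false_iff]
      intro hc
      exact h ((hloop.mp hc).eq_of_length hlen).symm
    rw [hfalse]
    simp [h]
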